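-- pv_equiv track=rewrite | github.com/nicobuzeta/uc-buscacursos-scraper | alex_parsing.py | process_components
-- ===== SOURCE A (Python) =====
-- def process_components(components):
--     components = components.split(':', 1)[1]
--     separated_components = []
--     m_description = None
--     last = 0
--     for i, letter in enumerate(components):
--         if letter == '(' or letter == ',':
--             component = components[last:i].strip()
--             separated_components.append(component)
--             last = i + 1
--             if letter == '(':
--                 m_description = components[i + 1:-1]
--                 break
--         if i == len(components) - 1:
--             component = components[last:].strip()
--             separated_components.append(component)
--
--     return separated_components, m_description
-- ===== SOURCE B (Python) =====
-- def process_components(components):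
--     body = components.split(':', 1)[1]
--     prefix, paren, rest = body.partition('(')
--     m_description = rest[:-1] if paren else None
--     separated_components = [c.strip() for c in prefix.split(',')] if body else []
--     return separated_components, m_description
-- ===== Notes on version B (the rewrite author's own statement) =====
-- stated objective: simpler
-- what changed: A's index-tracking character scan with `last` bookkeeping, a break and an end-of-string special case is replaced by a declarative partition to cut off the description plus a split-and-strip comprehension for the component list.
import Mathlib
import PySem

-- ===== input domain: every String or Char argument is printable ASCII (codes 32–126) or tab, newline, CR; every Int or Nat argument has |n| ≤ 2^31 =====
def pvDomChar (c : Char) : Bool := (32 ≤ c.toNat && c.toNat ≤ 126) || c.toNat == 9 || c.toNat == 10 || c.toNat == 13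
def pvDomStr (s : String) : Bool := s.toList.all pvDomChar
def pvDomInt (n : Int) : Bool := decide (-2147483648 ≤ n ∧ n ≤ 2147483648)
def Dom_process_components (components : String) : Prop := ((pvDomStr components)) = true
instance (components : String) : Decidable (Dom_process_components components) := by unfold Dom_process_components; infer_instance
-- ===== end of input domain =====

-- B replaces A's index-tracking scan-with-break by partition('(') + split(',') (objective: simpler decomposition).

-- ===== PORT A =====
-- A's for-loop: index i over the body, `last` = start of the current piece, `acc` = separated_components
def pvLoopA (body : List Char) (i last : Nat) (acc : List String) : List String × Option String :=
  if h : i < body.length then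
    let letter := body[i]
    if letter = '(' ∨ letter = ',' then
      -- component = components[last:i].strip(); separated_components.append(component); last = i + 1
      let acc' := acc ++ [String.ofList (PySem.Chars.strip (PySem.List.slice body (some (last:Int)) (some (i:Int))))]
      if letter = '(' then
        -- m_description = components[i+1:-1]; break
        (acc', some (String.ofList (PySem.List.slice body (some ((i:Int)+1)) (some (-1)))))
      else
        -- letter = ',': fall through to the `if i == len(components) - 1` check, with last = i + 1
        let acc'' := if i = body.length - 1 then acc' ++ [String.ofList (PySem.Chars.strip (PySem.List.slice body (some (((i+1:Nat)):Int)) none))] else acc'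
        pvLoopA body (i+1) (i+1) acc''
    else
      let acc' := if i = body.length - 1 then acc ++ [String.ofList (PySem.Chars.strip (PySem.List.slice body (some (last:Int)) none))] else acc
      pvLoopA body (i+1) last acc'
  else (acc, none)
termination_by body.length - i

def process_components (components : String) : List String × Option String :=
  -- components = components.split(':', 1)[1] — the IndexError (no ':') is excluded by Pre_
  match (PySem.Str.splitMax? components ":" 1).bind (fun ps => PySem.List.pyGet? ps 1) with
  | none => ([], none)
  | some body => pvLoopA body.toList 0 0 []

-- ===== PORT B =====
-- [c.strip() for c in prefix.split(',')]
def pvPieces (cs : List Char) : List String :=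
  (PySem.Chars.splitOn cs [',']).map (fun c => String.ofList (PySem.Chars.strip c))

def process_components_alt (components : String) : List String × Option String :=
  -- body = components.split(':', 1)[1] — the IndexError (no ':') is excluded by Pre_
  match (PySem.Str.splitMax? components ":" 1).bind (fun ps => PySem.List.pyGet? ps 1) with
  | none => ([], none)
  | some body =>
    let cs := body.toList
    -- hand port of body.partition('('): exact — split at the FIRST '(' (= index?), or (body, '', '') if '(' is absent
    match PySem.List.index? cs '(' with
    | some j =>
        -- paren nonempty: m_description = rest[:-1]
        ((if cs = [] then [] else pvPieces (cs.take j)),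
         some (String.ofList (PySem.List.slice (cs.drop (j+1)) none (some (-1)))))
    | none => ((if cs = [] then [] else pvPieces cs), none)

-- ===== PRECONDITION & SPEC =====
-- Pre_ excludes exactly the inputs with no ':' — there A's (and B's) `.split(':', 1)[1]` raises IndexError.
def Pre_process_components (components : String) : Prop := PySem.Str.isIn ":" components = true
instance (components : String) : Decidable (Pre_process_components components) := by unfold Pre_process_components; infer_instance
def pvWitness_process_components : String := "Comp: A , B(see notes)"

def Spec_process_components (components : String) (out : List String × Option String) : Prop := out = process_components_alt components
instance (components : String) (out : List String × Option String) : Decidable (Spec_process_components components out) := by unfold Spec_process_components; infer_instance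

-- ===== CLAIM (what is proved, stated in full; the proofs are below) =====
def Claim_equal_process_components : Prop := ∀ (components : String), Dom_process_components components → Pre_process_components components → Spec_process_components components (process_components components)

-- ===== LEMMAS AND PROOFS =====

-- proof-side reference splitter: pvSplit pre l = the comma-pieces of pre ++ l, the first piece opened by pre
def pvSplit (pre : List Char) : List Char → List (List Char)
  | [] => [pre]
  | c :: r => if c = ',' then pre :: pvSplit [] r else pvSplit (pre ++ [c]) r

lemma pvSplit_go (fuel : Nat) : ∀ (l cur : List Char) (acc : List (List Char)), l.length < fuel →
    PySem.Chars.splitOn.go [','] fuel l cur acc = acc.reverse ++ pvSplit cur.reverse l := by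
  induction fuel with
  | zero => intro l cur acc h; omega
  | succ fuel ih =>
    intro l cur acc h
    cases l with
    | nil => simp [PySem.Chars.splitOn.go, pvSplit]
    | cons c rest =>
      by_cases hc : c = ','
      · subst hc
        rw [PySem.Chars.splitOn.go]
        simp only [List.isPrefixOf, BEq.rfl, Bool.true_and]
        rw [ih _ _ _ (by simpa using Nat.lt_of_succ_lt_succ h)]
        simp [pvSplit]
      · rw [PySem.Chars.splitOn.go]
        have hpre : [','].isPrefixOf (c :: rest) = false := by
          simp [List.isPrefixOf]
          exact fun h' => absurd h'.symm hc
        rw [hpre]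
        simp only [Bool.false_eq_true, if_false]
        rw [ih _ _ _ (by simpa using Nat.lt_of_succ_lt_succ h)]
        simp [pvSplit, hc]

lemma splitOn_eq_pvSplit (cs : List Char) : PySem.Chars.splitOn cs [','] = pvSplit [] cs := by
  unfold PySem.Chars.splitOn
  rw [pvSplit_go (cs.length + 1) cs [] [] (by omega)]
  simp

-- pushing a comma-free block into the open piece
lemma pvSplit_free (m : List Char) : ∀ (pre r : List Char), (∀ c ∈ m, c ≠ ',') →
    pvSplit pre (m ++ r) = pvSplit (pre ++ m) r := by
  induction m with
  | nil => simp
  | cons c m ih =>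
    intro pre r hm
    have hc : c ≠ ',' := hm c (by simp)
    simp only [List.cons_append, pvSplit, if_neg hc]
    rw [ih _ _ (fun d hd => hm d (by simp [hd]))]
    simp

lemma pvSplit_free_single (m : List Char) (h : ∀ c ∈ m, c ≠ ',') : pvSplit [] m = [m] := by
  have := pvSplit_free m [] [] h
  simpa [pvSplit] using this

-- xs[n:-1] for 0 ≤ n ≤ len xs
lemma slice_pos_neg_one (xs : List Char) (n : Nat) (h : n ≤ xs.length) :
    PySem.List.slice xs (some (n:Int)) (some (-1)) = (xs.drop n).dropLast := by
  simp only [PySem.List.slice, PySem.List.clampIdx]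
  have h1 : ¬ ((n:Int) < 0) := by omega
  have h2 : (-1 : Int) < 0 := by norm_num
  rw [if_neg h1, if_pos h2]
  have h3 : min ((n:Int)).toNat xs.length = n := by omega
  rw [h3, List.dropLast_eq_take]
  by_cases hz : (xs.length : Int) + -1 < 0
  · have hx : xs.length = 0 := by omega
    rw [if_pos hz]
    simp [List.eq_nil_of_length_eq_zero hx]
  · rw [if_neg hz]
    have h4 : ((xs.length:Int) + -1).toNat - n = (xs.drop n).length - 1 := by
      rw [List.length_drop]; omega
    rw [h4]

-- body[last:] splits at position i (last ≤ i < len)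
lemma drop_split (body : List Char) (last i : Nat) (h1 : last ≤ i) (h3 : i < body.length) :
    body.drop last = (body.drop last).take (i - last) ++ body[i] :: body.drop (i+1) := by
  conv_lhs => rw [← List.take_append_drop (i - last) (body.drop last)]
  congr 1
  rw [List.drop_drop]
  have : last + (i - last) = i := by omega
  rw [this, List.drop_eq_getElem_cons h3]

-- body[last:j] splits at position i (last ≤ i < j, i < len)
lemma seg_split (body : List Char) (last i j : Nat) (h1 : last ≤ i) (h2 : i < j) (h3 : i < body.length) :
    (body.drop last).take (j - last) =
      (body.drop last).take (i - last) ++ body[i] :: (body.drop (i+1)).take (j - (i+1)) := by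
  conv_lhs => rw [drop_split body last i h1 h3, List.take_append]
  have hlen : ((body.drop last).take (i - last)).length = i - last := by
    simp; omega
  rw [List.take_take, hlen]
  have hmin : min (j - last) (i - last) = i - last := by omega
  have h5 : j - last - (i - last) = (j - (i+1)) + 1 := by omega
  rw [hmin, h5, List.take_succ_cons]

-- members of body[last:i] are body[k] for last ≤ k < i
lemma mem_seg (body : List Char) (last i : Nat) (c : Char)
    (hc : c ∈ (body.drop last).take (i - last)) : ∃ k, last ≤ k ∧ k < i ∧ body[k]? = some c := by
  rw [List.mem_iff_getElem] at hc
  obtain ⟨m, hm, hval⟩ := hc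
  simp only [List.length_take, List.length_drop] at hm
  have hm2 : m < i - last := lt_of_lt_of_le hm (min_le_left _ _)
  have hm3 : last + m < body.length := by omega
  rw [List.getElem_take, List.getElem_drop] at hval
  exact ⟨last + m, by omega, by omega, by rw [List.getElem?_eq_getElem hm3, hval]⟩

def pvF : List Char → String := fun c => String.ofList (PySem.Chars.strip c)

-- what the rest of A's loop produces, closed-form: split the unfinished piece body[last:]
-- (extended to the first '(' at/after i, or to the end) on the commas at/after i
def pvOut (body : List Char) (i last : Nat) (acc : List String) : List String × Option String :=
  match PySem.List.index? (body.drop i) '(' with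
  | some p =>
      (acc ++ (pvSplit [] ((body.drop last).take ((i+p) - last))).map pvF,
       some (String.ofList ((body.drop (i+p+1)).dropLast)))
  | none =>
      (acc ++ (pvSplit [] (body.drop last)).map pvF, none)

lemma pvLoopA_spec (n : Nat) : ∀ (body : List Char) (i last : Nat) (acc : List String),
    body.length - i = n → i < body.length → last ≤ i →
    (∀ k, last ≤ k → k < i → body[k]? ≠ some ',' ∧ body[k]? ≠ some '(') →
    pvLoopA body i last acc = pvOut body i last acc := by
  induction n with
  | zero => intro body i last acc hn hil _ _; omega
  | succ n ih =>
    intro body i last acc hn hil hli hinv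
    have hseg_free : ∀ c ∈ (body.drop last).take (i - last), c ≠ ',' := by
      intro c hc hcc
      obtain ⟨k, hk1, hk2, hk3⟩ := mem_seg body last i c hc
      exact (hinv k hk1 hk2).1 (by rw [hk3, hcc])
    rw [pvLoopA]
    rw [dif_pos hil]
    by_cases hpar : body[i] = '('
    · simp only [if_pos (Or.inl hpar), if_pos hpar]
      unfold pvOut
      rw [List.drop_eq_getElem_cons hil, hpar, PySem.List.index?_cons_self]
      simp only [Nat.add_zero]
      rw [PySem.List.slice_natCast, pvSplit_free_single _ hseg_free]
      have hc1 : ((i:Int)+1) = (((i+1:Nat)):Int) := by push_cast; ring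
      rw [hc1, slice_pos_neg_one body (i+1) (by omega)]
      simp [pvF]
    · by_cases hcom : body[i] = ','
      · simp only [if_pos (Or.inr hcom), if_neg hpar]
        have hidx : PySem.List.index? (body.drop i) '(' =
            Option.map (fun x => x + 1) (PySem.List.index? (body.drop (i+1)) '(') := by
          rw [List.drop_eq_getElem_cons hil, PySem.List.index?_cons_of_ne _ hpar]
        by_cases hlast : i = body.length - 1
        · rw [if_pos hlast, pvLoopA, dif_neg (by omega)]
          have hdrop : body.drop (i+1) = [] := List.drop_of_length_le (by omega)
          unfold pvOut
          rw [hidx, hdrop]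
          simp only [PySem.List.index?, List.idxOf?_nil, Option.map_none]
          have hds : body.drop last = (body.drop last).take (i - last) ++ (',' :: []) := by
            have := drop_split body last i hli hil
            rw [hcom, hdrop] at this; exact this
          rw [hds, pvSplit_free _ _ _ hseg_free]
          simp only [pvSplit]
          rw [PySem.List.slice_natCast, PySem.List.slice_from_natCast, hdrop]
          simp [pvF]
        · rw [if_neg hlast]
          rw [ih body (i+1) (i+1) _ (by omega) (by omega) (le_refl _) (by intro k h1 h2; omega)]
          unfold pvOut
          rw [hidx]
          cases hpi : PySem.List.index? (body.drop (i+1)) '(' with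
          | some p =>
            simp only [Option.map_some]
            have hj : (body.drop last).take ((i + (p+1)) - last) =
                (body.drop last).take (i - last) ++ ',' :: (body.drop (i+1)).take ((i+1+p) - (i+1)) := by
              have := seg_split body last i (i+p+1) hli (by omega) hil
              rw [hcom] at this
              have e1 : i + (p+1) = i + p + 1 := by omega
              have e2 : i + 1 + p = i + p + 1 := by omega
              rw [e1, e2]; exact this
            rw [hj, pvSplit_free _ _ _ hseg_free]
            simp only [pvSplit]
            have e3 : i + 1 + p + 1 = i + (p+1) + 1 := by omega
            rw [PySem.List.slice_natCast, e3]
            simp [pvF]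
          | none =>
            simp only [Option.map_none]
            have hds : body.drop last = (body.drop last).take (i - last) ++ ',' :: body.drop (i+1) := by
              have := drop_split body last i hli hil
              rw [hcom] at this; exact this
            rw [hds, pvSplit_free _ _ _ hseg_free]
            simp only [pvSplit]
            rw [PySem.List.slice_natCast]
            simp [pvF]
      · simp only [if_neg (by simp [hpar, hcom] : ¬ (body[i] = '(' ∨ body[i] = ','))]
        have hidx : PySem.List.index? (body.drop i) '(' =
            Option.map (fun x => x + 1) (PySem.List.index? (body.drop (i+1)) '(') := by
          rw [List.drop_eq_getElem_cons hil, PySem.List.index?_cons_of_ne _ hpar]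
        by_cases hlast : i = body.length - 1
        · rw [if_pos hlast, pvLoopA, dif_neg (by omega)]
          have hdrop : body.drop (i+1) = [] := List.drop_of_length_le (by omega)
          unfold pvOut
          rw [hidx, hdrop]
          simp only [PySem.List.index?, List.idxOf?_nil, Option.map_none]
          have hds : body.drop last = (body.drop last).take (i - last) ++ [body[i]] := by
            have := drop_split body last i hli hil
            rw [hdrop] at this; exact this
          have hfree : ∀ c ∈ (body.drop last).take (i - last) ++ [body[i]], c ≠ ',' := by
            intro c hc
            rcases List.mem_append.mp hc with h | h
            · exact hseg_free c h
            · simp at h; rw [h]; exact hcom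
          rw [PySem.List.slice_from_natCast, hds, pvSplit_free_single _ hfree]
          simp [pvF]
        · rw [if_neg hlast]
          rw [ih body (i+1) last _ (by omega) (by omega) (by omega) ?_]
          · unfold pvOut
            rw [hidx]
            cases hpi : PySem.List.index? (body.drop (i+1)) '(' with
            | some p =>
              simp only [Option.map_some]
              have e1 : i + 1 + p = i + (p+1) := by omega
              rw [e1]
            | none => rfl
          · intro k h1 h2
            rcases Nat.lt_or_ge k i with h | h
            · exact hinv k h1 h
            · have : k = i := by omega
              subst this
              rw [List.getElem?_eq_getElem hil]
              constructor
              · intro hx; exact hcom (by injection hx)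
              · intro hx; exact hpar (by injection hx)

lemma pv_top_eq (components : String) : process_components components = process_components_alt components := by
  unfold process_components process_components_alt
  cases hb : (PySem.Str.splitMax? components ":" 1).bind (fun ps => PySem.List.pyGet? ps 1) with
  | none => rfl
  | some body =>
    simp only
    by_cases hnil : body.toList = []
    · rw [hnil, pvLoopA, dif_neg (by simp)]
      simp [PySem.List.index?]
    · have h0 : 0 < body.toList.length := List.length_pos_iff.mpr hnil
      rw [pvLoopA_spec body.toList.length body.toList 0 0 [] (by omega) h0 (le_refl 0)
        (by intro k h1 h2; omega)]
      unfold pvOut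
      simp only [List.drop_zero]
      have hne : ¬ body = "" := fun h => hnil (by simp [h])
      cases hpi : PySem.List.index? body.toList '(' with
      | some p =>
        simp [pvPieces, splitOn_eq_pvSplit, pvF, if_neg hne, PySem.List.slice_to_neg_one]
      | none =>
        simp [pvPieces, splitOn_eq_pvSplit, pvF, if_neg hne]

-- ===== VERDICT (by name: the statement is the Claim_ definition above) =====
theorem process_components_spec : Claim_equal_process_components := by
  intro components _ _
  exact pv_top_eq components
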